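-- pv_equiv track=rewrite | github.com/k-roy/RECTIFY | rectify/core/local_aligner.py | _is_homopolymer_ref
-- ===== SOURCE A (Python) =====
-- def _is_homopolymer_ref(seq: str, pos: int, min_run: int = 3) -> bool:
--     """Return True if position *pos* in *seq* is within a homopolymer run >= *min_run*."""
--     if pos < 0 or pos >= len(seq):
--         return False
--     base = seq[pos].upper()
--     if base == 'N':
--         return False
--     left = pos
--     while left > 0 and seq[left - 1].upper() == base:
--         left -= 1
--     right = pos + 1
--     while right < len(seq) and seq[right].upper() == base:
--         right += 1
--     return (right - left) >= min_run
-- ===== SOURCE B (Python) =====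
-- def _runs(u):
--     """Segment u into maximal homopolymer runs as (char, length) pairs."""
--     out = []
--     i = 0
--     n = len(u)
--     while i < n:
--         j = i + 1
--         while j < n and u[j] == u[i]:
--             j += 1
--         out.append((u[i], j - i))
--         i = j
--     return out
--
--
-- def _is_homopolymer_ref(seq: str, pos: int, min_run: int = 3) -> bool:
--     if pos < 0 or pos >= len(seq):
--         return False
--     u = seq.upper()
--     start = 0
--     for ch, ln in _runs(u):
--         if start <= pos < start + ln:
--             return ch != 'N' and ln >= min_run
--         start += ln
--     return False
-- ===== Notes on version B (the rewrite author's own statement) =====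
-- stated objective: alternative
-- what changed: Replaces A's local two-pointer expansion left/right from pos by segmenting the whole uppercased sequence into maximal (char, length) runs and looking up the run whose interval contains pos.
import Mathlib
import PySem

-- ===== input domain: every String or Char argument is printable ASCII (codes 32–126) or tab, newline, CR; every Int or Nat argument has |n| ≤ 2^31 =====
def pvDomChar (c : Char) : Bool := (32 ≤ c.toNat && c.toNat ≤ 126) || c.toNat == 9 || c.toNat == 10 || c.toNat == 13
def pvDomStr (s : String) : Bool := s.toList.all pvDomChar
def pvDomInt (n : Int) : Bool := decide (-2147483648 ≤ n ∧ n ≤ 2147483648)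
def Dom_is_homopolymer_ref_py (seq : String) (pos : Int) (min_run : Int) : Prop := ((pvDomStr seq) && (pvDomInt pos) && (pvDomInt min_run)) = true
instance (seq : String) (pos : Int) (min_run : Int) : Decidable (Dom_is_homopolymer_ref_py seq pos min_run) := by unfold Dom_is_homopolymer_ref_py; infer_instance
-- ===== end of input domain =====

-- B replaces A's local two-pointer expansion around pos by segmenting the whole
-- uppercased sequence into maximal runs and looking up the run containing pos
-- (objective: alternative decomposition, same cost).

-- ===== PORT A =====
-- seq[i].upper() at a Nat index (A only evaluates it in range)
def upAtA (l : List Char) (i : Nat) : Char := PySem.Chars.upperChar (l.getD i ' ')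

-- 'while left > 0 and seq[left-1].upper() == base: left -= 1' (argument = current left)
def goLeft (l : List Char) (base : Char) : Nat → Nat
  | 0 => 0
  | n + 1 => if upAtA l n == base then goLeft l base n else n + 1

-- 'while right < len(seq) and seq[right].upper() == base: right += 1' (fuel ≥ len - r)
def goRight (l : List Char) (base : Char) : Nat → Nat → Nat
  | 0, r => r
  | fuel + 1, r => if r < l.length && (upAtA l r == base) then goRight l base fuel (r + 1) else r

def is_homopolymer_ref_py (seq : String) (pos : Int) (min_run : Int) : Bool :=
  let l := seq.toList
  if pos < 0 || pos ≥ (l.length : Int) then false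
  else
    let p := pos.toNat
    let base := upAtA l p
    if base == 'N' then false
    else
      let left := goLeft l base p
      let right := goRight l base l.length (p + 1)
      decide (((right : Int) - (left : Int)) ≥ min_run)

-- ===== PORT B =====
-- inner while of _runs: length of the prefix of t equal to b
def prefRun (b : Char) : List Char → Nat
  | [] => 0
  | c :: t => if c == b then prefRun b t + 1 else 0

-- _runs(u): maximal (char, length) runs, outer while as structural recursion
def runsCh : List Char → List (Char × Nat)
  | [] => []
  | c :: t =>
    let k := prefRun c t
    (c, k + 1) :: runsCh (t.drop k)
  termination_by l => l.length
  decreasing_by simp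

-- the 'for ch, ln in _runs(u)' loop with accumulator start
def findRun (pos min_run : Int) : List (Char × Nat) → Nat → Bool
  | [], _ => false
  | (ch, ln) :: rest, start =>
    if (start : Int) ≤ pos ∧ pos < (start : Int) + (ln : Int) then
      (ch != 'N') && decide ((ln : Int) ≥ min_run)
    else findRun pos min_run rest (start + ln)

def is_homopolymer_ref_py_alt (seq : String) (pos : Int) (min_run : Int) : Bool :=
  let l := seq.toList
  if pos < 0 || pos ≥ (l.length : Int) then false
  else
    let u := PySem.Chars.upper l
    findRun pos min_run (runsCh u) 0

-- ===== PRECONDITION & SPEC =====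
def Spec_is_homopolymer_ref_py (seq : String) (pos : Int) (min_run : Int) (out : Bool) : Prop := out = is_homopolymer_ref_py_alt seq pos min_run
instance (seq : String) (pos : Int) (min_run : Int) (out : Bool) : Decidable (Spec_is_homopolymer_ref_py seq pos min_run out) := by unfold Spec_is_homopolymer_ref_py; infer_instance

-- ===== CLAIM (what is proved, stated in full; the proofs are below) =====
def Claim_equal_is_homopolymer_ref_py : Prop := ∀ (seq : String) (pos : Int) (min_run : Int), Dom_is_homopolymer_ref_py seq pos min_run → Spec_is_homopolymer_ref_py seq pos min_run (is_homopolymer_ref_py seq pos min_run)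

-- ===== LEMMAS AND PROOFS =====

theorem getD_upper (l : List Char) (i : Nat) :
    (PySem.Chars.upper l).getD i ' ' = upAtA l i := by
  simp only [PySem.Chars.upper, upAtA, List.getD, List.getElem?_map]
  cases l[i]? with
  | none => rfl
  | some c => rfl

theorem prefRun_le (b : Char) (xs : List Char) : prefRun b xs ≤ xs.length := by
  induction xs with
  | nil => simp [prefRun]
  | cons c t ih => simp only [prefRun]; split <;> simp <;> omega

theorem getD_lt_prefRun (b : Char) (xs : List Char) (i : Nat) (h : i < prefRun b xs) :
    xs.getD i ' ' = b := by
  induction xs generalizing i with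
  | nil => simp [prefRun] at h
  | cons c t ih =>
    simp only [prefRun] at h
    split at h
    · cases i with
      | zero => simpa using (by assumption : (c == b) = true)
      | succ j => simpa using ih j (by omega)
    · omega

theorem prefRun_stop (b : Char) (xs : List Char) (h : prefRun b xs < xs.length) :
    xs.getD (prefRun b xs) ' ' ≠ b := by
  induction xs with
  | nil => simp at h
  | cons c t ih =>
    by_cases hc : (c == b) = true
    · have h1 : prefRun b (c :: t) = prefRun b t + 1 := by simp [prefRun, hc]
      rw [h1] at h ⊢
      simp only [List.length_cons] at h
      simpa [List.getD_cons_succ] using ih (by omega)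
    · have h1 : prefRun b (c :: t) = 0 := by simp [prefRun, hc]
      rw [h1]
      simpa using hc

theorem prefRun_append (b : Char) (xs ys : List Char) :
    prefRun b (xs ++ ys) =
      if prefRun b xs = xs.length then xs.length + prefRun b ys else prefRun b xs := by
  induction xs with
  | nil => simp [prefRun]
  | cons c t ih =>
    simp only [List.cons_append, prefRun]
    split <;> rename_i hc
    · rw [ih]
      by_cases h : prefRun b t = t.length <;> simp [h] <;> omega
    · have := prefRun_le b t
      simp only [List.length_cons]
      split <;> omega

theorem prefRun_eq_length_all (b : Char) (xs : List Char) (h : prefRun b xs = xs.length) :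
    ∀ x ∈ xs, x = b := by
  induction xs with
  | nil => simp
  | cons c t ih =>
    simp only [prefRun, List.length_cons] at h
    split at h <;> rename_i hc
    · intro x hx
      rcases List.mem_cons.mp hx with rfl | hx
      · simpa using hc
      · exact ih (by omega) x hx
    · have := prefRun_le b t; omega

theorem all_prefRun (b : Char) (xs : List Char) (h : ∀ x ∈ xs, x = b) :
    prefRun b xs = xs.length := by
  induction xs with
  | nil => simp [prefRun]
  | cons c t ih =>
    have hc : c = b := h c (by simp)
    simp [prefRun, hc, ih (fun x hx => h x (by simp [hx]))]

theorem mem_take_eq (b : Char) (xs : List Char) (p : Nat) (h : p ≤ prefRun b xs) :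
    ∀ x ∈ xs.take p, x = b := by
  intro x hx
  have hmem : x ∈ xs.take (prefRun b xs) := by
    have : xs.take p = (xs.take (prefRun b xs)).take p := by
      rw [List.take_take, Nat.min_eq_left h]
    rw [this] at hx
    exact List.take_subset _ _ hx
  rcases List.mem_iff_getElem.mp hmem with ⟨i, hi, rfl⟩
  have hlt : i < prefRun b xs := by
    have := List.length_take_le (prefRun b xs) xs; omega
  have := getD_lt_prefRun b xs i hlt
  rw [List.getD_eq_getElem?_getD] at this
  have hix : i < xs.length := by have := prefRun_le b xs; omega
  rw [List.getElem?_eq_getElem hix] at this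
  simp only [Option.getD_some] at this
  rw [List.getElem_take] at *
  exact this

theorem prefRun_drop (b : Char) (xs : List Char) (p : Nat) (h : p ≤ prefRun b xs) :
    prefRun b (xs.drop p) = prefRun b xs - p := by
  induction xs generalizing p with
  | nil => simp [prefRun] at *
  | cons c t ih =>
    cases p with
    | zero => simp
    | succ q =>
      simp only [prefRun] at h ⊢
      split at h <;> rename_i hc
      · simpa [List.drop_succ_cons, prefRun, hc] using ih q (by omega)
      · omega

theorem getD_drop (l : List Char) (n i : Nat) :
    (l.drop n).getD i ' ' = l.getD (n + i) ' ' := by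
  simp [List.getD, List.getElem?_drop]

-- A-side characterisations
theorem goLeft_add (l : List Char) (base : Char) (p : Nat) (hp : p ≤ l.length) :
    goLeft l base p + prefRun base (((PySem.Chars.upper l).take p).reverse) = p := by
  induction p with
  | zero => simp [goLeft, prefRun]
  | succ q ih =>
    have hq' : q < (PySem.Chars.upper l).length := by
      simpa [PySem.Chars.upper] using (by omega : q < l.length)
    have hget : (PySem.Chars.upper l)[q] = upAtA l q := by
      rw [← getD_upper l q, List.getD_eq_getElem?_getD, List.getElem?_eq_getElem hq']
      rfl
    have htake : ((PySem.Chars.upper l).take (q + 1)).reverse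
        = upAtA l q :: ((PySem.Chars.upper l).take q).reverse := by
      rw [List.take_add_one, List.getElem?_eq_getElem hq', Option.toList_some,
        List.reverse_append, hget]
      rfl
    set R := ((PySem.Chars.upper l).take q).reverse with hR
    rw [htake]
    by_cases hc : upAtA l q = base
    · have h1 : prefRun base (upAtA l q :: R) = prefRun base R + 1 := by simp [prefRun, hc]
      have h2 : goLeft l base (q + 1) = goLeft l base q := by simp [goLeft, hc]
      rw [h1, h2]
      have := ih (by omega)
      omega
    · have h1 : prefRun base (upAtA l q :: R) = 0 := by simp [prefRun, hc]
      have h2 : goLeft l base (q + 1) = q + 1 := by simp [goLeft, hc]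
      rw [h1, h2]

theorem goRight_eq (l : List Char) (base : Char) (fuel r : Nat)
    (h : l.length ≤ fuel + r) :
    goRight l base fuel r = r + prefRun base ((PySem.Chars.upper l).drop r) := by
  induction fuel generalizing r with
  | zero =>
    have hnil : (PySem.Chars.upper l).drop r = [] := by
      apply List.drop_eq_nil_of_le
      simpa [PySem.Chars.upper] using h
    simp [goRight, hnil, prefRun]
  | succ f ih =>
    by_cases hr : r < l.length
    · have hr' : r < (PySem.Chars.upper l).length := by simpa [PySem.Chars.upper] using hr
      have hget : (PySem.Chars.upper l)[r] = upAtA l r := by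
        rw [← getD_upper l r, List.getD_eq_getElem?_getD, List.getElem?_eq_getElem hr']
        rfl
      have hdrop : (PySem.Chars.upper l).drop r = upAtA l r :: (PySem.Chars.upper l).drop (r + 1) := by
        rw [List.drop_eq_getElem_cons hr', hget]
      rw [hdrop]
      by_cases hc : upAtA l r = base
      · have h1 : prefRun base (upAtA l r :: (PySem.Chars.upper l).drop (r + 1))
            = prefRun base ((PySem.Chars.upper l).drop (r + 1)) + 1 := by simp [prefRun, hc]
        have h2 : goRight l base (f + 1) r = goRight l base f (r + 1) := by
          simp [goRight, hr, hc]
        rw [h1, h2, ih (r + 1) (by omega)]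
        omega
      · have h1 : prefRun base (upAtA l r :: (PySem.Chars.upper l).drop (r + 1)) = 0 := by
          simp [prefRun, hc]
        have h2 : goRight l base (f + 1) r = r := by simp [goRight, hr, hc]
        rw [h1, h2]
        omega
    · have hnil : (PySem.Chars.upper l).drop r = [] := by
        apply List.drop_eq_nil_of_le
        simpa [PySem.Chars.upper] using (by omega : l.length ≤ r)
      have h2 : goRight l base (f + 1) r = r := by simp [goRight, hr]
      simp [h2, hnil, prefRun]

-- B-side: findRun over the run decomposition computes the same run statistics
theorem findRun_runs (n : Nat) : ∀ u : List Char, u.length ≤ n → ∀ (s p : Nat) (m : Int),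
    p < u.length →
    findRun ((s : Int) + (p : Int)) m (runsCh u) s =
      ((u.getD p ' ' != 'N') &&
        decide ((1 + (prefRun (u.getD p ' ') ((u.take p).reverse) : Int)
          + (prefRun (u.getD p ' ') (u.drop (p + 1)) : Int)) ≥ m)) := by
  induction n with
  | zero => intro u hu s p m hp; omega
  | succ n ih =>
    intro u hu s p m hp
    match u with
    | [] => simp at hp
    | c :: t =>
      set k := prefRun c t with hk
      have hprefu : prefRun c (c :: t) = k + 1 := by simp [prefRun]; omega
      rw [show runsCh (c :: t) = (c, k + 1) :: runsCh (t.drop k) from by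
        rw [runsCh, ← hk]]
      by_cases hcase : p ≤ k
      · -- pos lies in the first run
        have hb : (c :: t).getD p ' ' = c := getD_lt_prefRun c (c :: t) p (by omega)
        have hback : prefRun c (((c :: t).take p).reverse) = p := by
          have hall : ∀ x ∈ (c :: t).take p, x = c := mem_take_eq c (c :: t) p (by omega)
          rw [all_prefRun c _ (by intro x hx; exact hall x (List.mem_reverse.mp hx))]
          simp only [List.length_reverse]
          exact List.length_take_of_le (by simp at hp ⊢; omega)
        have hfwd : prefRun c ((c :: t).drop (p + 1)) = k - p := by
          rw [prefRun_drop c (c :: t) (p + 1) (by omega), hprefu]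
          omega
        rw [show findRun ((s : Int) + (p : Int)) m ((c, k + 1) :: runsCh (t.drop k)) s =
              ((c != 'N') && decide (((k + 1 : Nat) : Int) ≥ m)) from by
          simp only [findRun]
          rw [if_pos (by constructor <;> push_cast <;> omega)]]
        simp only [hb, hback, hfwd,
          show (1 + (p : Int) + ((k - p : Nat) : Int)) = ((k + 1 : Nat) : Int) from by omega]
      · -- pos lies after the first run: recurse
        have hpk : k + 1 ≤ p := by omega
        set p' := p - (k + 1) with hp'
        have hdrop : t.drop k = (c :: t).drop (k + 1) := by simp
        have hp'lt : p' < ((c :: t).drop (k + 1)).length := by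
          simp only [List.length_drop, List.length_cons]
          simp at hp; omega
        have hlen : ((c :: t).drop (k + 1)).length ≤ n := by
          simp only [List.length_drop, List.length_cons]
          simp at hu; omega
        rw [show findRun ((s : Int) + (p : Int)) m ((c, k + 1) :: runsCh (t.drop k)) s =
              findRun (((s + (k + 1) : Nat) : Int) + (p' : Int)) m
                (runsCh ((c :: t).drop (k + 1))) (s + (k + 1)) from by
          simp only [findRun]
          rw [if_neg (by push_cast; omega), hdrop]
          congr 1
          push_cast; omega]
        rw [ih ((c :: t).drop (k + 1)) hlen (s + (k + 1)) p' m hp'lt]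
        -- translation invariance of the three run statistics
        have hb' : ((c :: t).drop (k + 1)).getD p' ' ' = (c :: t).getD p ' ' := by
          rw [getD_drop]; congr 1; omega
        have hfwd' : ((c :: t).drop (k + 1)).drop (p' + 1) = (c :: t).drop (p + 1) := by
          rw [List.drop_drop]; congr 1; omega
        have hback' : prefRun ((c :: t).getD p ' ') (((c :: t).take p).reverse) =
            prefRun ((c :: t).getD p ' ') ((((c :: t).drop (k + 1)).take p').reverse) := by
          set b := (c :: t).getD p ' ' with hbdef
          have hsplit : (c :: t).take p =
              (c :: t).take (k + 1) ++ ((c :: t).drop (k + 1)).take p' := by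
            rw [← List.take_add]; congr 1; omega
          rw [hsplit, List.reverse_append, prefRun_append]
          have hlen' : ((((c :: t).drop (k + 1)).take p').reverse).length = p' := by
            simp only [List.length_reverse]
            exact List.length_take_of_le (by omega)
          split <;> rename_i hfull
          · -- the backward scan covers all of the later part; it stops at the run boundary
            rw [hlen']
            have hbeq : b = ((c :: t).drop (k + 1)).getD 0 ' ' := by
              rcases Nat.eq_zero_or_pos p' with h0 | h0
              · rw [← hb', h0]
              · have hall := prefRun_eq_length_all b _ hfull
                have hmem : ((c :: t).drop (k + 1)).getD 0 ' ' ∈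
                    (((c :: t).drop (k + 1)).take p') := by
                  match hd : (c :: t).drop (k + 1), hp'lt with
                  | h :: tt, _ =>
                    match p', h0 with
                    | q + 1, _ => simp [List.take_succ_cons]
                rw [hall _ (List.mem_reverse.mpr hmem)]
            have hne : ((c :: t).drop (k + 1)).getD 0 ' ' ≠ c := by
              rw [getD_drop]
              simp only [Nat.add_zero, List.getD_cons_succ]
              apply prefRun_stop c t
              simp at hp; omega
            have hku : k < (c :: t).length := by simp at hp ⊢; omega
            have htake : ((c :: t).take (k + 1)).reverse =
                (c :: t).getD k ' ' :: ((c :: t).take k).reverse := by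
              have hku' : k < (c :: t).length := hku
              rw [List.take_succ, List.getElem?_eq_getElem hku', Option.toList_some,
                List.reverse_append, List.getD_eq_getElem?_getD,
                List.getElem?_eq_getElem hku']
              rfl
            rw [htake]
            have hkc : (c :: t).getD k ' ' = c := getD_lt_prefRun c (c :: t) k (by omega)
            have hbc : b ≠ c := by rw [hbeq]; exact hne
            have hcb : ¬ ((c == b) = true) := by
              simp only [beq_iff_eq]
              exact fun h => hbc h.symm
            simp only [prefRun, hkc]
            rw [if_neg hcb]
            omega
          · rfl
        rw [hb', hfwd', hback']

-- ===== VERDICT (by name: the statement is the Claim_ definition above) =====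
theorem is_homopolymer_ref_py_spec : Claim_equal_is_homopolymer_ref_py := by
  unfold Claim_equal_is_homopolymer_ref_py Spec_is_homopolymer_ref_py
  intro seq pos min_run _
  unfold is_homopolymer_ref_py is_homopolymer_ref_py_alt
  set l := seq.toList with hl
  by_cases hg : pos < 0 || pos ≥ (l.length : Int)
  · simp [hg]
  · simp only [hg, if_false, Bool.false_eq_true]
    have hg' : ¬ (pos < 0 ∨ (l.length : Int) ≤ pos) := by
      simpa [not_or] using hg
    push_neg at hg'
    obtain ⟨h0, hlt⟩ := hg'
    set p := pos.toNat with hp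
    have hpos : pos = (p : Int) := by omega
    have hplt : p < l.length := by omega
    have hplt' : p < (PySem.Chars.upper l).length := by
      simpa [PySem.Chars.upper] using hplt
    have hB : findRun pos min_run (runsCh (PySem.Chars.upper l)) 0 =
        (((PySem.Chars.upper l).getD p ' ' != 'N') &&
          decide ((1 + (prefRun ((PySem.Chars.upper l).getD p ' ')
              (((PySem.Chars.upper l).take p).reverse) : Int)
            + (prefRun ((PySem.Chars.upper l).getD p ' ')
              ((PySem.Chars.upper l).drop (p + 1)) : Int)) ≥ min_run)) := by
      rw [show pos = ((0 : Nat) : Int) + (p : Int) from by omega]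
      exact findRun_runs (PySem.Chars.upper l).length (PySem.Chars.upper l) le_rfl 0 p
        min_run hplt'
    rw [hB, getD_upper]
    set base := upAtA l p with hbase
    by_cases hN : base == 'N'
    · simp only [hN, if_pos rfl]
      simp only [beq_iff_eq] at hN
      simp [hN]
    · simp only [hN, if_false]
      have hNne : base ≠ 'N' := by simpa using hN
      have hLeft := goLeft_add l base p (by omega)
      have hRight := goRight_eq l base l.length (p + 1) (by omega)
      set back := prefRun base (((PySem.Chars.upper l).take p).reverse) with hbk
      set fwd := prefRun base ((PySem.Chars.upper l).drop (p + 1)) with hfw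
      rw [hRight]
      have hL : (goLeft l base p : Int) = (p : Int) - (back : Int) := by omega
      rw [hL]
      have hNf : (base == 'N') = false := by simpa using hN
      have harith : ((((p + 1) + fwd : Nat) : Int) - ((p : Int) - (back : Int)))
          = 1 + (back : Int) + (fwd : Int) := by push_cast; omega
      simp only [bne, hNf, Bool.not_false, Bool.true_and, harith]
      simp
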